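-- pv_equiv track=rewrite | github.com/3ximus/algorithms | 4_trees/12_check_one_child_node.py | check_one_child_node
-- ===== SOURCE A (Python) =====
-- def check_one_child_node(preorder):
-- 	'''Check if all internal nodes of a BST have only one child'''
-- 	maximum = minimum = preorder[-1]
-- 	# traverse in reverse order (ignoring last element)
-- 	for i in range(len(preorder) - 2, -1, -1):
-- 		if not (preorder[i] < minimum or preorder[i] > maximum):
-- 			return False
-- 		maximum = max(preorder[i], maximum)
-- 		minimum = min(preorder[i], minimum)
-- 	return True
-- ===== SOURCE B (Python) =====
-- def check_one_child_node(preorder):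
--     '''Check if all internal nodes of a BST have only one child'''
--     # forward BST descent: keep an open interval (lo, hi) and the previous value
--     prev = preorder[0]
--     lo = hi = None
--     for x in preorder[1:]:
--         if (lo is not None and x <= lo) or (hi is not None and x >= hi):
--             return False
--         if x < prev:
--             hi = prev
--         elif x > prev:
--             lo = prev
--         else:
--             return False
--         prev = x
--     return True
-- ===== Notes on version B (the rewrite author's own statement) =====
-- stated objective: alternative
-- what changed: Replaces the right-to-left scan that maintains the min/max of the suffix with a left-to-right simulated BST descent that maintains an open interval (lo, hi) and the previous value.
import Mathlib
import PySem

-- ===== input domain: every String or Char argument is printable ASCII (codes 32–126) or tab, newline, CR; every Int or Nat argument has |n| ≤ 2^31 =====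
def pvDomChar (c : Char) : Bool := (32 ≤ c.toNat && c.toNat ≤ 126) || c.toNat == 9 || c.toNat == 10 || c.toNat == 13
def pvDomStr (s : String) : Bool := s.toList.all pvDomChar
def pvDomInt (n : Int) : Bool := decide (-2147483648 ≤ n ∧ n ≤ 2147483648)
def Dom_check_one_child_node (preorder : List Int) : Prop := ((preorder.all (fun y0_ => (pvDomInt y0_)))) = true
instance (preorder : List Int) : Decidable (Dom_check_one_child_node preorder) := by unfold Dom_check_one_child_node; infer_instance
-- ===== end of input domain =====

-- B replaces A's right-to-left suffix-min/max scan by a left-to-right simulated BST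
-- descent keeping an open interval (lo, hi) and the previous value (objective: alternative).

-- ===== PORT A =====
-- the loop 'for i in range(len(preorder)-2, -1, -1)' visits exactly the values of
-- preorder.dropLast in reverse order; state (maximum, minimum), early return = false
def pvALoop : List Int → Int → Int → Bool
  | [], _, _ => true
  | v :: rest, mx, mn =>
    if !(decide (v < mn) || decide (v > mx)) then false
    else pvALoop rest (max v mx) (min v mn)

def check_one_child_node (preorder : List Int) : Bool :=
  match PySem.List.pyGet? preorder (-1) with
  | none => true   -- unreachable: Python raises IndexError on []; excluded by Pre_
  | some last => pvALoop (preorder.dropLast).reverse last last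

-- ===== PORT B =====
-- forward descent: fail if x outside the open interval (lo, hi); narrow by prev
def pvBLoop : List Int → Option Int → Option Int → Int → Bool
  | [], _, _, _ => true
  | x :: r, lo, hi, prev =>
    if (lo.elim false fun l => decide (x ≤ l)) || (hi.elim false fun h => decide (h ≤ x)) then
      false
    else if x < prev then pvBLoop r lo (some prev) x
    else if prev < x then pvBLoop r (some prev) hi x
    else false

def check_one_child_node_alt (preorder : List Int) : Bool :=
  match preorder with
  | [] => true     -- unreachable: Python raises IndexError on []; excluded by Pre_
  | x :: rest => pvBLoop rest none none x

-- ===== PRECONDITION & SPEC =====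
-- Pre_ excludes only the empty list, on which both Pythons raise IndexError
def Pre_check_one_child_node (preorder : List Int) : Prop := preorder ≠ []
instance (preorder : List Int) : Decidable (Pre_check_one_child_node preorder) := by
  unfold Pre_check_one_child_node; infer_instance
def pvWitness_check_one_child_node : List Int := ([3, 1, 2])

def Spec_check_one_child_node (preorder : List Int) (out : Bool) : Prop := out = check_one_child_node_alt preorder
instance (preorder : List Int) (out : Bool) : Decidable (Spec_check_one_child_node preorder out) := by unfold Spec_check_one_child_node; infer_instance

-- ===== CLAIM (what is proved, stated in full; the proofs are below) =====
def Claim_equal_check_one_child_node : Prop := ∀ (preorder : List Int), Dom_check_one_child_node preorder → Pre_check_one_child_node preorder → Spec_check_one_child_node preorder (check_one_child_node preorder)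

-- ===== LEMMAS AND PROOFS =====

-- common specification: every element is below all later elements or above all of them
def pvSep : List Int → Bool
  | [] => true
  | x :: r => ((r.all fun y => decide (y < x)) || (r.all fun y => decide (x < y))) && pvSep r

theorem foldl_min_lt (l : List Int) (a x : Int) :
    x < l.foldl min a ↔ x < a ∧ ∀ y ∈ l, x < y := by
  induction l generalizing a with
  | nil => simp
  | cons w l ih =>
      simp only [List.foldl_cons, ih, List.mem_cons]
      constructor
      · rintro ⟨h1, h2⟩
        exact ⟨(lt_min_iff.mp h1).1, fun y hy => by
          rcases hy with rfl | hy
          · exact (lt_min_iff.mp h1).2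
          · exact h2 y hy⟩
      · rintro ⟨h1, h2⟩
        exact ⟨lt_min_iff.mpr ⟨h1, h2 w (Or.inl rfl)⟩, fun y hy => h2 y (Or.inr hy)⟩

theorem foldl_max_gt (l : List Int) (a x : Int) :
    l.foldl max a < x ↔ a < x ∧ ∀ y ∈ l, y < x := by
  induction l generalizing a with
  | nil => simp
  | cons w l ih =>
      simp only [List.foldl_cons, ih, List.mem_cons]
      constructor
      · rintro ⟨h1, h2⟩
        exact ⟨(max_lt_iff.mp h1).1, fun y hy => by
          rcases hy with rfl | hy
          · exact (max_lt_iff.mp h1).2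
          · exact h2 y hy⟩
      · rintro ⟨h1, h2⟩
        exact ⟨max_lt_iff.mpr ⟨h1, h2 w (Or.inl rfl)⟩, fun y hy => h2 y (Or.inr hy)⟩

theorem pvALoop_append (u : List Int) (v mx mn : Int) :
    pvALoop (u ++ [v]) mx mn =
      (pvALoop u mx mn && (decide (v < u.foldl min mn) || decide (u.foldl max mx < v))) := by
  induction u generalizing mx mn with
  | nil =>
      show pvALoop [v] mx mn = (true && _)
      simp only [pvALoop, List.foldl_nil, Bool.true_and]
      by_cases h1 : v < mn <;> by_cases h2 : mx < v <;>
        simp [h1, h2, gt_iff_lt]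
  | cons w u ih =>
      by_cases h : (decide (w < mn) || decide (w > mx)) = true
      · rw [show pvALoop ((w :: u) ++ [v]) mx mn = pvALoop (u ++ [v]) (max w mx) (min w mn) from by
            simp [pvALoop, h],
          show pvALoop (w :: u) mx mn = pvALoop u (max w mx) (min w mn) from by
            simp [pvALoop, h],
          ih]
        simp only [List.foldl_cons, min_comm mn w, max_comm mx w]
      · rw [show pvALoop ((w :: u) ++ [v]) mx mn = false from by simp [pvALoop, h],
          show pvALoop (w :: u) mx mn = false from by simp [pvALoop, h]]
        simp

-- A computes pvSep on every nonempty list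
theorem checkA_eq_sep (xs : List Int) (hne : xs ≠ []) :
    check_one_child_node xs = pvSep xs := by
  induction xs with
  | nil => exact absurd rfl hne
  | cons x r ih =>
      rcases eq_or_ne r [] with rfl | hr
      · simp [check_one_child_node, PySem.List.pyGet?_neg_one, pvALoop, pvSep]
      · have hlast : PySem.List.pyGet? (x :: r) (-1) = some ((x :: r).getLast (by simp)) := by
          rw [PySem.List.pyGet?_neg_one, List.getLast?_eq_some_getLast]
        have hdrop : (x :: r).dropLast = x :: r.dropLast := List.dropLast_cons_of_ne_nil hr
        have hlast2 : (x :: r).getLast (by simp) = r.getLast hr := List.getLast_cons hr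
        have hrin : PySem.List.pyGet? r (-1) = some (r.getLast hr) := by
          rw [PySem.List.pyGet?_neg_one, List.getLast?_eq_some_getLast]
        -- decompose r into dropLast r ++ [getLast r]
        have hsplit : r.dropLast ++ [r.getLast hr] = r := List.dropLast_append_getLast hr
        have hmem : ∀ y : Int, y ∈ r ↔ (y ∈ (r.dropLast).reverse ∨ y = r.getLast hr) := by
          intro y
          conv_lhs => rw [← hsplit]
          simp [or_comm]
        rw [show check_one_child_node (x :: r)
              = pvALoop ((x :: r).dropLast).reverse (r.getLast hr) (r.getLast hr) by
            simp [check_one_child_node, hlast, hlast2]]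
        rw [hdrop]
        simp only [List.reverse_cons]
        rw [pvALoop_append]
        have hA : pvALoop (r.dropLast).reverse (r.getLast hr) (r.getLast hr)
            = check_one_child_node r := by
          simp [check_one_child_node, hrin]
        rw [hA, ih hr]
        -- compare the two boolean conditions pointwise
        have h1 : (decide (x < ((r.dropLast).reverse).foldl min (r.getLast hr)) = true)
            ↔ ((r.all fun y => decide (x < y)) = true) := by
          rw [decide_eq_true_iff, foldl_min_lt, List.all_eq_true]
          constructor
          · rintro ⟨ha, hb⟩ y hy
            rcases (hmem y).mp hy with h | rfl
            · exact decide_eq_true (hb y h)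
            · exact decide_eq_true ha
          · intro h
            refine ⟨of_decide_eq_true (h _ ((hmem _).mpr (Or.inr rfl))), fun y hy =>
              of_decide_eq_true (h y ((hmem y).mpr (Or.inl hy)))⟩
        have h2 : (decide (((r.dropLast).reverse).foldl max (r.getLast hr) < x) = true)
            ↔ ((r.all fun y => decide (y < x)) = true) := by
          rw [decide_eq_true_iff, foldl_max_gt, List.all_eq_true]
          constructor
          · rintro ⟨ha, hb⟩ y hy
            rcases (hmem y).mp hy with h | rfl
            · exact decide_eq_true (hb y h)
            · exact decide_eq_true ha
          · intro h
            refine ⟨of_decide_eq_true (h _ ((hmem _).mpr (Or.inr rfl))), fun y hy =>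
              of_decide_eq_true (h y ((hmem y).mpr (Or.inl hy)))⟩
        have e1 : decide (x < ((r.dropLast).reverse).foldl min (r.getLast hr))
            = (r.all fun y => decide (x < y)) := Bool.eq_iff_iff.mpr (by simpa using h1)
        have e2 : decide (((r.dropLast).reverse).foldl max (r.getLast hr) < x)
            = (r.all fun y => decide (y < x)) := Bool.eq_iff_iff.mpr (by simpa using h2)
        rw [e1, e2]
        show (pvSep r && ((r.all fun y => decide (x < y)) || (r.all fun y => decide (y < x)))) = pvSep (x :: r)
        simp only [pvSep]
        rw [Bool.and_comm, Bool.or_comm]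

def pvOkLo (lo : Option Int) (y : Int) : Prop := ∀ l ∈ lo, l < y
def pvOkHi (hi : Option Int) (y : Int) : Prop := ∀ h ∈ hi, y < h

-- one-level characterisation of pvSep
theorem pvSep_cons_iff (x : Int) (r : List Int) :
    pvSep (x :: r) = true ↔ ((∀ y ∈ r, y < x) ∨ (∀ y ∈ r, x < y)) ∧ pvSep r = true := by
  show (((r.all fun y => decide (y < x)) || (r.all fun y => decide (x < y))) && pvSep r) = true ↔ _
  simp [List.all_eq_true]

-- B's loop invariant: with prev strictly inside (lo, hi), the loop accepts exactly when
-- prev :: r is separated and every element of r lies strictly inside (lo, hi)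
theorem pvBLoop_eq (r : List Int) (lo hi : Option Int) (prev : Int)
    (hlo : pvOkLo lo prev) (hhi : pvOkHi hi prev) :
    pvBLoop r lo hi prev = true ↔ (pvSep (prev :: r) = true ∧ ∀ y ∈ r, pvOkLo lo y ∧ pvOkHi hi y) := by
  induction r generalizing lo hi prev with
  | nil => simp [pvBLoop, pvSep]
  | cons x r ih =>
      by_cases hb : ((lo.elim false fun l => decide (x ≤ l)) || (hi.elim false fun h => decide (h ≤ x))) = true
      · rw [show pvBLoop (x :: r) lo hi prev = false by simp [pvBLoop, hb]]
        simp only [Bool.false_eq_true, false_iff]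
        rintro ⟨-, hall⟩
        rcases Bool.or_eq_true_iff.mp hb with h | h
        · rcases lo with _ | l2
          · simp [Option.elim] at h
          · have hx : x ≤ l2 := of_decide_eq_true (by simpa [Option.elim] using h)
            have := (hall x (by simp)).1 l2 rfl
            omega
        · rcases hi with _ | h2
          · simp [Option.elim] at h
          · have hx : h2 ≤ x := of_decide_eq_true (by simpa [Option.elim] using h)
            have := (hall x (by simp)).2 h2 rfl
            omega
      · have hxlo : pvOkLo lo x := by
          rcases lo with _ | l2
          · intro a ha; cases ha
          · intro a ha; cases ha
            by_contra hcon
            apply hb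
            have hd : (Option.elim (some l2) false fun l => decide (x ≤ l)) = true := by
              simp only [Option.elim]; exact decide_eq_true (by omega)
            rw [hd, Bool.true_or]
        have hxhi : pvOkHi hi x := by
          rcases hi with _ | h2
          · intro a ha; cases ha
          · intro a ha; cases ha
            by_contra hcon
            apply hb
            have hd : (Option.elim (some h2) false fun h => decide (h ≤ x)) = true := by
              simp only [Option.elim]; exact decide_eq_true (by omega)
            rw [hd, Bool.or_true]
        rw [show pvBLoop (x :: r) lo hi prev
            = (if x < prev then pvBLoop r lo (some prev) x
               else if prev < x then pvBLoop r (some prev) hi x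
               else false) by simp [pvBLoop, hb]]
        by_cases hx : x < prev
        · rw [if_pos hx, ih lo (some prev) x hxlo (by intro h hh; cases hh; exact hx)]
          rw [pvSep_cons_iff prev (x :: r)]
          constructor
          · rintro ⟨hsep, hall⟩
            have hallprev : ∀ y ∈ r, y < prev := fun y hy => (hall y hy).2 prev rfl
            refine ⟨⟨Or.inl fun y hy => ?_, hsep⟩, fun y hy => ?_⟩
            · rcases List.mem_cons.mp hy with rfl | hy
              · exact hx
              · exact hallprev y hy
            · rcases List.mem_cons.mp hy with rfl | hy
              · exact ⟨hxlo, hxhi⟩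
              · exact ⟨(hall y hy).1, fun h hh => lt_trans (hallprev y hy) (hhi h hh)⟩
          · rintro ⟨⟨hor, hsep⟩, hall⟩
            have hallprev : ∀ y ∈ x :: r, y < prev := by
              rcases hor with h | h
              · exact h
              · exact absurd (h x (by simp)) (by omega)
            exact ⟨hsep, fun y hy =>
              ⟨(hall y (by simp [hy])).1, fun p hp => by cases hp; exact hallprev y (by simp [hy])⟩⟩
        · by_cases hx2 : prev < x
          · rw [if_neg hx, if_pos hx2, ih (some prev) hi x (by intro l hl; cases hl; exact hx2) hxhi]
            rw [pvSep_cons_iff prev (x :: r)]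
            constructor
            · rintro ⟨hsep, hall⟩
              have hallprev : ∀ y ∈ r, prev < y := fun y hy => (hall y hy).1 prev rfl
              refine ⟨⟨Or.inr fun y hy => ?_, hsep⟩, fun y hy => ?_⟩
              · rcases List.mem_cons.mp hy with rfl | hy
                · exact hx2
                · exact hallprev y hy
              · rcases List.mem_cons.mp hy with rfl | hy
                · exact ⟨hxlo, hxhi⟩
                · exact ⟨fun l hl => lt_trans (hlo l hl) (hallprev y hy), (hall y hy).2⟩
            · rintro ⟨⟨hor, hsep⟩, hall⟩
              have hallprev : ∀ y ∈ x :: r, prev < y := by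
                rcases hor with h | h
                · exact absurd (h x (by simp)) (by omega)
                · exact h
              exact ⟨hsep, fun y hy =>
                ⟨fun p hp => by cases hp; exact hallprev y (by simp [hy]), (hall y (by simp [hy])).2⟩⟩
          · rw [if_neg hx, if_neg hx2]
            simp only [Bool.false_eq_true, false_iff]
            rintro ⟨hsep, -⟩
            rw [pvSep_cons_iff prev (x :: r)] at hsep
            rcases hsep.1 with h | h
            · exact absurd (h x (by simp)) (by omega)
            · exact absurd (h x (by simp)) (by omega)

theorem checkB_eq_sep (xs : List Int) (hne : xs ≠ []) :
    check_one_child_node_alt xs = pvSep xs := by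
  match xs with
  | [] => exact absurd rfl hne
  | x :: r =>
    show pvBLoop r none none x = pvSep (x :: r)
    have h := pvBLoop_eq r none none x (by intro l hl; simp at hl) (by intro l hl; simp at hl)
    have h2 : pvBLoop r none none x = true ↔ pvSep (x :: r) = true := by
      rw [h]
      exact ⟨fun a => a.1,
        fun a => ⟨a, fun y _ => ⟨by intro l hl; simp at hl, by intro l hl; simp at hl⟩⟩⟩
    exact Bool.eq_iff_iff.mpr (by simpa using h2)

-- ===== VERDICT (by name: the statement is the Claim_ definition above) =====
theorem check_one_child_node_spec : Claim_equal_check_one_child_node := by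
  intro preorder _ hpre
  unfold Spec_check_one_child_node
  rw [checkA_eq_sep preorder hpre, checkB_eq_sep preorder hpre]
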